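-- pv_equiv track=rewrite | github.com/ldct/cp | atcoder/abc182/B/B.py | argmax_all
-- ===== SOURCE A (Python) =====
-- def argmax_all(d):
--     am = None
--     for k in d:
--         if am is None or d[k] > d[am]:  am = k
--     ret = set()
--     for k in d:
--         if d[k] == d[am]: ret.add(k)
--     return ret
-- ===== SOURCE B (Python) =====
-- def argmax_all(d):
--     groups = {}
--     for k in d:
--         groups.setdefault(d[k], []).append(k)
--     if not groups:
--         return set()
--     return set(groups[max(groups)])
-- ===== Notes on version B (the rewrite author's own statement) =====
-- stated objective: alternative
-- what changed: Instead of A's running-argmax pass followed by a second equality scan, B makes one grouping pass building a dict value -> list of keys, then takes the max over the grouped values and returns that group's keys as a set.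
import Mathlib
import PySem

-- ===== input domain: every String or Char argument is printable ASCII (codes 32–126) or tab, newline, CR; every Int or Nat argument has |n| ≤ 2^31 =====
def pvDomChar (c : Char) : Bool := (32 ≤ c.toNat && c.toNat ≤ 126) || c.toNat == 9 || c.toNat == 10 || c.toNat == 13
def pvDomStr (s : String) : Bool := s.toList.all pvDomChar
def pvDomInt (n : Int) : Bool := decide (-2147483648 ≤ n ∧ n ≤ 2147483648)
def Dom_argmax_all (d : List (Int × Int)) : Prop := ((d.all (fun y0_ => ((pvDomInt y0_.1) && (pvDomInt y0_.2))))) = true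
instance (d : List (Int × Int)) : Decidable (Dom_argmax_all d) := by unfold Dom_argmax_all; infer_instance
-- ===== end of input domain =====

-- B replaces A's two compare-passes (running argmax, then equality scan) by one grouping pass
-- value -> list of keys plus a max-of-values lookup: an alternative decomposition, same cost class.


-- ===== PORT A =====
-- loop body of A's first pass: 'if am is None or d[k] > d[am]: am = k'
def pvAStep (dd : PySem.Dict Int Int) : Option Int → Int → Option Int
  | none, k => some k
  | some a, k => if dd.getD k 0 > dd.getD a 0 then some k else some a

def argmax_all (d : List (Int × Int)) : List Int :=
  let dd := PySem.Dict.ofList d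
  let am : Option Int := dd.keys.foldl (pvAStep dd) none
  -- second pass: 'ret = set(); for k in d: if d[k] == d[am]: ret.add(k)'
  dd.keys.foldl (fun ret k =>
      if dd.getD k 0 == (match am with | none => 0 | some a => dd.getD a 0)
      then PySem.Set.add ret k else ret) PySem.Set.empty

-- ===== PORT B =====
def argmax_all_alt (d : List (Int × Int)) : List Int :=
  let dd := PySem.Dict.ofList d
  -- 'groups.setdefault(d[k], []).append(k)' == groups[d[k]] = groups.get(d[k], []) + [k]
  let groups : PySem.Dict Int (List Int) :=
    dd.items.foldl (fun g p => g.modify p.2 [] (fun l => l ++ [p.1])) PySem.Dict.empty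
  match PySem.List.max? groups.keys (fun v => v) with
  | none => PySem.Set.empty
  | some m => PySem.Set.ofList (groups.getD m [])

-- ===== PRECONDITION & SPEC =====
def Spec_argmax_all (d : List (Int × Int)) (out : List Int) : Prop := out = argmax_all_alt d
instance (d : List (Int × Int)) (out : List Int) : Decidable (Spec_argmax_all d out) := by unfold Spec_argmax_all; infer_instance

-- ===== CLAIM (what is proved, stated in full; the proofs are below) =====
def Claim_equal_argmax_all : Prop := ∀ (d : List (Int × Int)), Dom_argmax_all d → Spec_argmax_all d (argmax_all d)

-- ===== LEMMAS AND PROOFS =====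

-- A's first pass from a seeded accumulator returns a key whose value is the running max of values.
theorem pvAStep_foldl (dd : PySem.Dict Int Int) (t : List Int) (a : Int) :
    ∃ b, t.foldl (pvAStep dd) (some a) = some b ∧
      dd.getD b 0 = (t.map (fun k => dd.getD k 0)).foldl max (dd.getD a 0) := by
  induction t generalizing a with
  | nil => exact ⟨a, rfl, rfl⟩
  | cons k t ih =>
    simp only [List.foldl_cons, List.map_cons, pvAStep]
    by_cases h : dd.getD k 0 > dd.getD a 0
    · obtain ⟨b, hb, hv⟩ := ih k
      exact ⟨b, by simp [h, hb], by rw [hv]; congr 1; omega⟩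
    · obtain ⟨b, hb, hv⟩ := ih a
      exact ⟨b, by simp [h, hb], by rw [hv]; congr 1; omega⟩

-- foldl max stays in the list (or is the seed) and bounds every element
theorem pvFoldlMax_mem (t : List Int) (a : Int) : t.foldl max a = a ∨ t.foldl max a ∈ t := by
  induction t generalizing a with
  | nil => exact Or.inl rfl
  | cons x t ih =>
    simp only [List.foldl_cons]
    rcases ih (max a x) with h | h
    · rcases max_choice a x with hm | hm
      · exact Or.inl (by rw [h, hm])
      · exact Or.inr (by rw [h, hm]; exact List.mem_cons_self)
    · exact Or.inr (List.mem_cons_of_mem _ h)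

theorem pvLe_foldlMax (t : List Int) (a : Int) :
    a ≤ t.foldl max a ∧ ∀ y ∈ t, y ≤ t.foldl max a := by
  induction t generalizing a with
  | nil => exact ⟨le_refl a, by simp⟩
  | cons x t ih =>
    obtain ⟨h1, h2⟩ := ih (max a x)
    refine ⟨le_trans (le_max_left a x) h1, ?_⟩
    intro y hy
    rcases List.mem_cons.mp hy with rfl | hy
    · exact le_trans (le_max_right a y) h1
    · exact h2 y hy

-- A's second pass builds exactly the filtered key list (keys are distinct)
theorem pvSetBuild (c : Int → Bool) (t : List Int) (s : List Int)
    (hn : t.Nodup) (hd : ∀ x ∈ t, x ∉ s) :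
    t.foldl (fun ret k => if c k then PySem.Set.add ret k else ret) s = s ++ t.filter c := by
  induction t generalizing s with
  | nil => simp
  | cons k t ih =>
    simp only [List.foldl_cons, List.filter_cons]
    by_cases h : c k
    · rw [if_pos h, PySem.Set.add_of_not_mem (hd k List.mem_cons_self), if_pos h,
        ih (s ++ [k]) hn.of_cons (fun x hx => by
          simp only [List.mem_append, List.mem_singleton]
          rintro (hs | rfl)
          · exact hd x (List.mem_cons_of_mem _ hx) hs
          · exact (List.nodup_cons.mp hn).1 hx)]
      simp
    · rw [if_neg h, if_neg h, ih s hn.of_cons (fun x hx => hd x (List.mem_cons_of_mem _ hx))]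

-- B's grouping table: its keys and its lookups, in terms of the source dict
theorem pvGroups_keys (dd : PySem.Dict Int Int) :
    (dd.items.foldl (fun g p => g.modify p.2 [] (fun l => l ++ [p.1])) PySem.Dict.empty).keys
      = PySem.Set.ofList dd.values := by
  rw [PySem.Dict.keys_foldl_modify_key dd.items (fun p => p.2) [] (fun _ p => (fun l => l ++ [p.1]))]
  simp [PySem.Set.update_nil_left, PySem.Dict.values]

theorem pvGroups_getD (dd : PySem.Dict Int Int) (c : Int) :
    (dd.items.foldl (fun g p => g.modify p.2 [] (fun l => l ++ [p.1])) PySem.Dict.empty).getD c []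
      = (dd.items.filter (fun p => p.2 == c)).map (fun p => p.1) := by
  have : dd.items.foldl (fun g p => g.modify p.2 [] (fun l => l ++ [p.1])) PySem.Dict.empty
      = (dd.items.map (fun p => (p.2, p.1))).foldl
          (fun g q => g.modify q.1 [] (fun l => l ++ [q.2])) PySem.Dict.empty := by
    rw [List.foldl_map]
  rw [this, PySem.Dict.getD_foldl_modify_append]
  simp [List.filter_map, List.map_map, Function.comp_def]

-- ===== VERDICT (by name: the statement is the Claim_ definition above) =====
theorem argmax_all_spec : Claim_equal_argmax_all := by
  intro d _
  unfold Spec_argmax_all argmax_all argmax_all_alt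
  simp only []
  set dd := PySem.Dict.ofList d with hdd
  have hnd : dd.keys.Nodup := PySem.Dict.nodup_keys_ofList d
  rw [pvGroups_keys dd]
  have hvals : dd.values = dd.keys.map (fun k => dd.getD k 0) :=
    PySem.Dict.values_eq_map_keys dd hnd 0
  have hitems : dd.items = dd.keys.map (fun k => (k, dd.getD k 0)) :=
    PySem.Dict.items_eq_map_keys dd hnd 0
  cases hk : dd.keys with
  | nil =>
    have : dd.values = [] := by rw [hvals, hk]; rfl
    rw [this]
    rfl
  | cons k0 kt =>
    -- A's argmax
    obtain ⟨b, hb, hbv⟩ := pvAStep_foldl dd kt k0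
    have hamA : List.foldl (pvAStep dd) none (k0 :: kt) = some b := by
      simpa [pvAStep] using hb
    -- the max of the value list
    set M : Int := (kt.map (fun k => dd.getD k 0)).foldl max (dd.getD k0 0) with hM
    -- B's max over group keys equals M
    have hvals' : dd.values = (dd.getD k0 0) :: kt.map (fun k => dd.getD k 0) := by
      rw [hvals, hk]; rfl
    have hMmem : M ∈ dd.values := by
      rw [hvals', hM]
      rcases pvFoldlMax_mem (kt.map (fun k => dd.getD k 0)) (dd.getD k0 0) with h | h
      · rw [h]; exact List.mem_cons_self
      · exact List.mem_cons_of_mem _ h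
    have hMtop : ∀ y ∈ dd.values, y ≤ M := by
      intro y hy
      rw [hvals'] at hy
      obtain ⟨h1, h2⟩ := pvLe_foldlMax (kt.map (fun k => dd.getD k 0)) (dd.getD k0 0)
      rcases List.mem_cons.mp hy with rfl | hy
      · exact h1
      · exact h2 y hy
    obtain ⟨m, hm⟩ : ∃ m, PySem.List.max? (PySem.Set.ofList dd.values) (fun v => v) = some m := by
      cases hq : PySem.List.max? (PySem.Set.ofList dd.values) (fun v => v) with
      | none =>
        exfalso
        have := (PySem.List.max?_eq_none_iff _ _).mp hq
        exact absurd (this ▸ ((PySem.Set.mem_ofList _ _).mpr hMmem)) (List.not_mem_nil)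
      | some m => exact ⟨m, rfl⟩
    have hmM : m = M := by
      have h1 : m ∈ dd.values := (PySem.Set.mem_ofList _ _).mp (PySem.List.max?_mem hm)
      have h2 : M ≤ m := PySem.List.max?_isMax hm M ((PySem.Set.mem_ofList _ _).mpr hMmem)
      exact le_antisymm (hMtop m h1) h2
    rw [hamA, hm, hmM]
    dsimp only
    rw [pvGroups_getD dd M]
    -- both sides are keys with value M, in key order
    have hbM : dd.getD b 0 = M := hbv
    have hfilter :
        (dd.items.filter (fun p => p.2 == M)).map (fun p => p.1)
          = dd.keys.filter (fun k => dd.getD k 0 == M) := by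
      rw [hitems, List.filter_map, List.map_map]
      simp [Function.comp_def]
    rw [hfilter, PySem.Set.ofList_eq_self_of_nodup _ (hnd.filter _)]
    simp only [hbM]
    rw [← hk,
      pvSetBuild (fun k => dd.getD k 0 == M) dd.keys PySem.Set.empty hnd (by simp [PySem.Set.empty])]
    simp [PySem.Set.empty]
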